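-- pv_equiv track=rewrite | github.com/chloesrcb/downscaling | downscaling/preprocess.py | make_X_names
-- ===== SOURCE A (Python) =====
-- def make_X_names(n_feat: int = 27) -> list[str]:
--     """Names on matrix [time, pix] with 3 fixed times (-1h,0,+1h)."""
--     dt_labels = ["-1h", "0h", "+1h"]
--     names = []
--     k = 0
--     p = 1
--     while k < n_feat:
--         for dt in dt_labels:
--             if k >= n_feat:
--                 break
--             names.append(f"X_p{p:02d}_dt{dt}")
--             k += 1
--         p += 1
--     return names
-- ===== SOURCE B (Python) =====
-- def make_X_names(n_feat: int = 27) -> list[str]: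
--     """Names on matrix [time, pix] with 3 fixed times (-1h,0,+1h)."""
--     dt_labels = ["-1h", "0h", "+1h"]
--     return [f"X_p{k // 3 + 1:02d}_dt{dt_labels[k % 3]}" for k in range(n_feat)]
-- ===== Notes on version B (the rewrite author's own statement) =====
-- stated objective: simpler
-- what changed: Replaces the nested while/for-with-break and the manual k/p counters by a single flat comprehension over the index range that computes each name's block number and time-offset label in closed form via divmod of the index by the number of time labels.
import Mathlib
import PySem

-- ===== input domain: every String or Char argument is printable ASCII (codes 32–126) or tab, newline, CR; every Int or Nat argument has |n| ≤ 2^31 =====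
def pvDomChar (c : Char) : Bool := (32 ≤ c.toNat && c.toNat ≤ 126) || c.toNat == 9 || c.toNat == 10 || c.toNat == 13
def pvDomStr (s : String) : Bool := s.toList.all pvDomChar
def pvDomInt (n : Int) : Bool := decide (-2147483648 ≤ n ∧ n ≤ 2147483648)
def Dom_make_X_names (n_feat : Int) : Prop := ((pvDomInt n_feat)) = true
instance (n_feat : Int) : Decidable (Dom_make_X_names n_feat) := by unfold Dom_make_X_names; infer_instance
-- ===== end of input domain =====

-- B replaces A's nested while/for-with-break and manual k/p counters by one flat pass over
-- range(n_feat) computing each name's block and offset in closed form (k//3, k%3): simpler.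

-- shared helper: port of the f-string "X_p{p:02d}_dt{dt}" (exact for the p ≥ 1 both programs use)
def pad2 (p : Int) : String :=
  let s := PySem.Int.toStr p
  if s.toList.length < 2 then "0" ++ s else s

def fmtName (p : Int) (dt : String) : String := "X_p" ++ pad2 p ++ "_dt" ++ dt

-- ===== PORT A =====
-- inner 'for dt in dt_labels' with its 'if k >= n_feat: break' (once k ≥ n it stays ≥ n, so
-- skipping the remaining labels is exactly the break)
def makeInner (n : Int) (labels : List String) (p : Int) (st : Int × List String) :
    Int × List String :=
  labels.foldl (fun st dt => if st.1 ≥ n then st else (st.1 + 1, st.2 ++ [fmtName p dt])) st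

theorem makeInner_fst_gt (n k p : Int) (names : List String) (h : k < n) :
    k < (makeInner n ["-1h", "0h", "+1h"] p (k, names)).1 := by
  simp only [makeInner, List.foldl]
  split_ifs <;> simp_all <;> omega

def makeLoop (n k p : Int) (names : List String) : List String :=
  if h : k < n then
    let st := makeInner n ["-1h", "0h", "+1h"] p (k, names)
    makeLoop n st.1 (p + 1) st.2
  else names
termination_by (n - k).toNat
decreasing_by
  have := makeInner_fst_gt n k p names h
  omega

def make_X_names (n_feat : Int) : List String := makeLoop n_feat 0 1 []

-- ===== PORT B =====
-- port of f"X_p{k // 3 + 1:02d}_dt{dt_labels[k % 3]}"; the pyGet? index k % 3 is always in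
-- range for the k ≥ 0 produced by range, so .getD "" is never taken
def bName (k : Int) : String :=
  fmtName (PySem.Int.floordiv k 3 + 1)
    ((PySem.List.pyGet? ["-1h", "0h", "+1h"] (PySem.Int.mod k 3)).getD "")

def make_X_names_alt (n_feat : Int) : List String :=
  (PySem.List.pyRange 0 n_feat 1).map bName

-- ===== PRECONDITION & SPEC =====
def Spec_make_X_names (n_feat : Int) (out : List String) : Prop := out = make_X_names_alt n_feat
instance (n_feat : Int) (out : List String) : Decidable (Spec_make_X_names n_feat out) := by unfold Spec_make_X_names; infer_instance

-- ===== CLAIM (what is proved, stated in full; the proofs are below) =====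
def Claim_equal_make_X_names : Prop := ∀ (n_feat : Int), Dom_make_X_names n_feat → Spec_make_X_names n_feat (make_X_names n_feat)

-- ===== LEMMAS AND PROOFS =====

theorem bName0 (k p : Int) (_hk : 0 ≤ k) (h : k = 3 * (p - 1)) : bName k = fmtName p "-1h" := by
  unfold bName
  rw [PySem.Int.floordiv_eq_ediv_of_pos (by omega), PySem.Int.mod_eq_emod_of_pos (by omega)]
  rw [show k % 3 = 0 by omega, show k / 3 + 1 = p by omega]
  rfl

theorem bName1 (k p : Int) (_hk : 0 ≤ k) (h : k = 3 * (p - 1)) :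
    bName (k + 1) = fmtName p "0h" := by
  unfold bName
  rw [PySem.Int.floordiv_eq_ediv_of_pos (by omega), PySem.Int.mod_eq_emod_of_pos (by omega)]
  rw [show (k + 1) % 3 = 1 by omega, show (k + 1) / 3 + 1 = p by omega]
  rfl

theorem bName2 (k p : Int) (_hk : 0 ≤ k) (h : k = 3 * (p - 1)) :
    bName (k + 2) = fmtName p "+1h" := by
  unfold bName
  rw [PySem.Int.floordiv_eq_ediv_of_pos (by omega), PySem.Int.mod_eq_emod_of_pos (by omega)]
  rw [show (k + 2) % 3 = 2 by omega, show (k + 2) / 3 + 1 = p by omega]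
  rfl

theorem loop_eq (m : Nat) : ∀ (n k p : Int) (names : List String),
    (n - k).toNat ≤ m → 0 ≤ k → k = 3 * (p - 1) →
    makeLoop n k p names = names ++ (PySem.List.pyRange k n 1).map bName := by
  induction m with
  | zero =>
    intro n k p names hm hk hp
    rw [makeLoop, dif_neg (by omega : ¬ k < n),
      PySem.List.pyRange_one_eq_nil (by omega : n ≤ k)]
    simp
  | succ m ih =>
    intro n k p names hm hk hp
    rw [makeLoop]
    by_cases h : k < n
    · rw [dif_pos h]
      by_cases h1 : n ≤ k + 1
      · have hin : makeInner n ["-1h", "0h", "+1h"] p (k, names) =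
            (k + 1, names ++ [fmtName p "-1h"]) := by
          simp [makeInner, show ¬ n ≤ k by omega, show n ≤ k + 1 from h1]
        rw [hin, makeLoop, dif_neg (by omega : ¬ k + 1 < n),
          PySem.List.pyRange_one_cons h, PySem.List.pyRange_one_eq_nil (by omega)]
        simp [bName0 k p hk hp]
      · by_cases h2 : n ≤ k + 2
        · have hin : makeInner n ["-1h", "0h", "+1h"] p (k, names) =
              (k + 2, names ++ [fmtName p "-1h"] ++ [fmtName p "0h"]) := by
            simp [makeInner, show ¬ n ≤ k by omega, show ¬ n ≤ k + 1 by omega,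
              show k + 1 + 1 = k + 2 by omega, show n ≤ k + 2 from h2]
          rw [hin, makeLoop, dif_neg (by omega : ¬ k + 2 < n),
            PySem.List.pyRange_one_cons h, PySem.List.pyRange_one_cons (by omega : k + 1 < n),
            PySem.List.pyRange_one_eq_nil (show n ≤ k + 1 + 1 by omega)]
          simp [bName0 k p hk hp, bName1 k p hk hp]
        · have hin : makeInner n ["-1h", "0h", "+1h"] p (k, names) =
              (k + 3, names ++ [fmtName p "-1h"] ++ [fmtName p "0h"] ++ [fmtName p "+1h"]) := by
            simp [makeInner, show ¬ n ≤ k by omega, show ¬ n ≤ k + 1 by omega,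
              show ¬ n ≤ k + 1 + 1 by omega, show k + 1 + 1 + 1 = k + 3 by omega]
          rw [hin,
            ih n (k + 3) (p + 1) _ (by omega) (by omega) (by omega),
            PySem.List.pyRange_one_cons h, PySem.List.pyRange_one_cons (by omega : k + 1 < n),
            PySem.List.pyRange_one_cons (by omega : k + 1 + 1 < n),
            show k + 1 + 1 + 1 = k + 3 by ring, show k + 1 + 1 = k + 2 by ring]
          simp [bName0 k p hk hp, bName1 k p hk hp, bName2 k p hk hp]
    · rw [dif_neg h, PySem.List.pyRange_one_eq_nil (by omega : n ≤ k)]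
      simp

-- ===== VERDICT (by name: the statement is the Claim_ definition above) =====
theorem make_X_names_spec : Claim_equal_make_X_names := by
  intro n _
  unfold Spec_make_X_names make_X_names make_X_names_alt
  rw [loop_eq (n - 0).toNat n 0 1 [] (by omega) (by omega) (by omega)]
  simp
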